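-- pv_equiv track=rewrite | github.com/ChavaNeiman/Auto-Complete | auto_complete.py | parse
-- ===== SOURCE A (Python) =====
-- def parse(query):
--     ignored_chars = [" ", ".", ",", "$", "@", "\t", "\n", ";", ":", "!", "?"]
--     parsed_seq = query.lower().split(" ")
--     fixed = []
--     for word in parsed_seq:
--         for char in ignored_chars:
--             word = word.replace(char, "")
--         if word != "":
--             fixed.append(word)
--     return fixed
-- ===== SOURCE B (Python) =====
-- def parse(query):
--     ignored = {'.', ',', '$', '@', '\t', '\n', ';', ':', '!', '?'}
--     result = []
--     buf = []
--     for c in query.lower():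
--         if c == ' ':
--             if buf:
--                 result.append(''.join(buf))
--                 buf = []
--         elif c in ignored:
--             pass
--         else:
--             buf.append(c)
--     if buf:
--         result.append(''.join(buf))
--     return result
-- ===== Notes on version B (the rewrite author's own statement) =====
-- stated objective: alternative
-- what changed: Replaces split-on-space followed by eleven full replace passes per word with a single left-to-right scan that builds tokens in a character buffer, skipping ignored characters and flushing on spaces.
import Mathlib
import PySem

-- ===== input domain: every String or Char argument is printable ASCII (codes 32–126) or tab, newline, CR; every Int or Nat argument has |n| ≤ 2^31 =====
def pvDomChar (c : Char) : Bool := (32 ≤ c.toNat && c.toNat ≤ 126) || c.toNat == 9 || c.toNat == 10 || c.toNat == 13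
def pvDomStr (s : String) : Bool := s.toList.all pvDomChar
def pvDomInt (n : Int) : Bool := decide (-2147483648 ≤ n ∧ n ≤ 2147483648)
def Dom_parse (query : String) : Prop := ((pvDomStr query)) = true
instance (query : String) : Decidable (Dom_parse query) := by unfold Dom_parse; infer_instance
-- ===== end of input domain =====

-- B: instead of A's split-on-space followed by eleven per-word replace passes,
-- a single left-to-right scan with a character buffer (alternative decomposition).


-- ===== PORT A =====
-- `split?` returns `some _` whenever the separator is nonempty, so `.getD []` is never taken.
def parse (query : String) : List String :=
  let ignored_chars : List String := [" ", ".", ",", "$", "@", "\t", "\n", ";", ":", "!", "?"]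
  let parsed_seq : List String := (PySem.Str.split? (PySem.Str.lower query) " ").getD []
  parsed_seq.foldl
    (fun fixed word =>
      let word := ignored_chars.foldl (fun w ch => PySem.Str.replace w ch "") word
      if word ≠ "" then fixed ++ [word] else fixed) []

-- ===== PORT B =====
def pvIgnB (c : Char) : Bool := c ∈ ['.', ',', '$', '@', '\t', '\n', ';', ':', '!', '?']

def pvStepB (st : List String × List Char) (c : Char) : List String × List Char :=
  if c = ' ' then
    if st.2.isEmpty then st else (st.1 ++ [String.ofList st.2], [])
  else if pvIgnB c then st
  else (st.1, st.2 ++ [c])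

def parse_alt (query : String) : List String :=
  let st := (PySem.Str.lower query).toList.foldl pvStepB ([], [])
  if st.2.isEmpty then st.1 else st.1 ++ [String.ofList st.2]

-- ===== PRECONDITION & SPEC =====
def Spec_parse (query : String) (out : List String) : Prop := out = parse_alt query
instance (query : String) (out : List String) : Decidable (Spec_parse query out) := by unfold Spec_parse; infer_instance

-- ===== CLAIM (what is proved, stated in full; the proofs are below) =====
def Claim_equal_parse : Prop := ∀ (query : String), Dom_parse query → Spec_parse query (parse query)

-- ===== LEMMAS AND PROOFS =====

-- the eleven characters A strips, as characters
def pvIgl : List Char := [' ', '.', ',', '$', '@', '\t', '\n', ';', ':', '!', '?']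
def pvKeep (c : Char) : Bool := !(pvIgl.contains c)

-- spec of A's split(" ") step: accumulate the current (reversed) word, break on ' '
def splitChar : List Char → List Char → List (List Char)
  | [], cur => [cur.reverse]
  | c :: t, cur => if c = ' ' then cur.reverse :: splitChar t [] else splitChar t (c :: cur)

-- spec of B's scan: tokens of l given the current buffer
def toks : List Char → List Char → List String
  | [], buf => if buf.isEmpty then [] else [String.ofList buf]
  | c :: t, buf =>
    if c = ' ' then (if buf.isEmpty then toks t [] else String.ofList buf :: toks t [])
    else if pvIgnB c then toks t buf
    else toks t (buf ++ [c])

theorem replace_go_single (c : Char) :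
    ∀ (l : List Char) (fuel : Nat) (acc : List Char), l.length ≤ fuel →
      PySem.Chars.replace.go [c] [] fuel l acc = acc.reverse ++ l.filter (fun x => x != c) := by
  intro l
  induction l with
  | nil =>
    intro fuel acc _
    cases fuel <;> simp [PySem.Chars.replace.go]
  | cons d t ih =>
    intro fuel acc h
    cases fuel with
    | zero => simp at h
    | succ f =>
      rw [PySem.Chars.replace.go]
      by_cases hd : d = c
      · subst hd
        have hp : ([d].isPrefixOf (d :: t)) = true := by simp [List.isPrefixOf]
        rw [hp, if_pos rfl]
        rw [show List.drop [d].length (d :: t) = t from rfl,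
            show (([] : List Char).reverse ++ acc) = acc from rfl]
        rw [ih f acc (by simpa using h)]
        simp
      · have hp : ([c].isPrefixOf (d :: t)) = false := by
          simp [List.isPrefixOf]
          exact fun hh => absurd hh.symm hd
        rw [hp, if_neg Bool.false_ne_true]
        rw [ih f (d :: acc) (by simpa using h)]
        have : (d != c) = true := by simp [hd]
        simp [this]

theorem replace_single (c : Char) (s : List Char) :
    PySem.Chars.replace s [c] [] = s.filter (fun x => x != c) := by
  rw [PySem.Chars.replace]
  rw [if_neg (by simp)]
  exact replace_go_single c s s.length [] (le_refl _)

theorem splitOn_go_char :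
    ∀ (l : List Char) (fuel : Nat) (cur : List Char) (acc : List (List Char)), l.length ≤ fuel →
      PySem.Chars.splitOn.go [' '] fuel l cur acc = acc.reverse ++ splitChar l cur := by
  intro l
  induction l with
  | nil =>
    intro fuel cur acc _
    cases fuel <;> simp [PySem.Chars.splitOn.go, splitChar]
  | cons d t ih =>
    intro fuel cur acc h
    cases fuel with
    | zero => simp at h
    | succ f =>
      rw [PySem.Chars.splitOn.go]
      by_cases hd : d = ' '
      · subst hd
        have hp : ([' '].isPrefixOf (' ' :: t)) = true := by simp [List.isPrefixOf]
        rw [hp, if_pos rfl]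
        rw [show List.drop [' '].length (' ' :: t) = t from rfl]
        rw [ih f [] (cur.reverse :: acc) (by simpa using h)]
        simp [splitChar]
      · have hp : ([' '].isPrefixOf (d :: t)) = false := by
          simp [List.isPrefixOf]
          exact fun hh => absurd hh.symm hd
        rw [hp, if_neg Bool.false_ne_true]
        rw [ih f (d :: cur) acc (by simpa using h)]
        simp [splitChar, hd]

theorem splitOn_char (s : List Char) :
    PySem.Chars.splitOn s [' '] = splitChar s [] := by
  rw [PySem.Chars.splitOn]
  rw [splitOn_go_char s (s.length + 1) [] [] (by omega)]
  simp

theorem ofList_eq_empty_iff (cs : List Char) : (String.ofList cs = "") ↔ cs = [] := by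
  constructor
  · intro h
    have := congrArg String.toList h
    simpa using this
  · intro h; subst h; rfl

theorem strip_step (ch : String) (c : Char) (h : ch.toList = [c]) (ds : List Char) :
    PySem.Str.replace (String.ofList ds) ch "" = String.ofList (ds.filter (fun x => x != c)) := by
  rw [PySem.Str.replace]
  simp [h, replace_single]

-- A's eleven replace passes strip exactly the ignored characters
theorem strip_eq (cs : List Char) :
    ([" ", ".", ",", "$", "@", "\t", "\n", ";", ":", "!", "?"] : List String).foldl
      (fun w ch => PySem.Str.replace w ch "") (String.ofList cs)
    = String.ofList (cs.filter pvKeep) := by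
  simp only [List.foldl]
  rw [strip_step " " ' ' (by decide), strip_step "." '.' (by decide),
      strip_step "," ',' (by decide), strip_step "$" '$' (by decide),
      strip_step "@" '@' (by decide), strip_step "\t" '\t' (by decide),
      strip_step "\n" '\n' (by decide), strip_step ";" ';' (by decide),
      strip_step ":" ':' (by decide), strip_step "!" '!' (by decide),
      strip_step "?" '?' (by decide)]
  congr 1
  simp only [List.filter_filter]
  refine List.filter_congr ?_
  intro a _
  by_cases h : a ∈ pvIgl
  · have hk : pvKeep a = false := by simp [pvKeep, h]
    rw [hk]
    simp only [pvIgl, List.mem_cons, List.not_mem_nil, or_false] at h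
    rcases h with h|h|h|h|h|h|h|h|h|h|h <;> subst h <;> decide
  · have hk : pvKeep a = true := by simp [pvKeep, h]
    rw [hk]
    simp only [pvIgl, List.mem_cons, List.not_mem_nil, or_false, not_or] at h
    obtain ⟨h1,h2,h3,h4,h5,h6,h7,h8,h9,h10,h11⟩ := h
    simp [h1,h2,h3,h4,h5,h6,h7,h8,h9,h10,h11]

theorem foldA (g : String → String) :
    ∀ (ws : List String) (acc : List String),
      ws.foldl (fun fixed word => let word := g word; if word ≠ "" then fixed ++ [word] else fixed) acc
      = acc ++ (ws.map g).filter (· ≠ "") := by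
  intro ws
  induction ws with
  | nil => intro acc; simp
  | cons w t ih =>
    intro acc
    rw [List.foldl_cons, ih]
    by_cases hw : g w = ""
    · simp [hw]
    · simp [hw]

theorem foldB :
    ∀ (l : List Char) (acc : List String) (buf : List Char),
      (if (l.foldl pvStepB (acc, buf)).2.isEmpty then (l.foldl pvStepB (acc, buf)).1
       else (l.foldl pvStepB (acc, buf)).1 ++ [String.ofList (l.foldl pvStepB (acc, buf)).2])
      = acc ++ toks l buf := by
  intro l
  induction l with
  | nil =>
    intro acc buf
    by_cases hb : buf.isEmpty <;> simp [toks, hb]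
  | cons c t ih =>
    intro acc buf
    rw [List.foldl_cons]
    by_cases hc : c = ' '
    · subst hc
      by_cases hb : buf.isEmpty
      · have hbuf : buf = [] := by simpa using hb
        subst hbuf
        have hst : pvStepB (acc, ([] : List Char)) ' ' = (acc, []) := by simp [pvStepB]
        rw [hst, ih acc []]
        simp [toks]
      · have hst : pvStepB (acc, buf) ' ' = (acc ++ [String.ofList buf], []) := by
          simp [pvStepB, hb]
        rw [hst, ih (acc ++ [String.ofList buf]) []]
        simp [toks, hb]
    · by_cases hi : pvIgnB c = true
      · have hst : pvStepB (acc, buf) c = (acc, buf) := by simp [pvStepB, hc, hi]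
        rw [hst, ih acc buf]
        simp [toks, hc, hi]
      · rw [Bool.not_eq_true] at hi
        have hst : pvStepB (acc, buf) c = (acc, buf ++ [c]) := by simp [pvStepB, hc, hi]
        rw [hst, ih acc (buf ++ [c])]
        simp [toks, hc, hi]

theorem keep_eq_not_ignB (c : Char) (h : c ≠ ' ') : pvKeep c = !pvIgnB c := by
  by_cases hm : pvIgnB c = true
  · have hmem : c ∈ pvIgl := by
      simp only [pvIgnB, List.mem_cons, List.not_mem_nil, or_false, decide_eq_true_eq] at hm
      simp only [pvIgl, List.mem_cons, List.not_mem_nil, or_false]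
      tauto
    simp [pvKeep, hmem, hm]
  · rw [Bool.not_eq_true] at hm
    have hmem : c ∉ pvIgl := by
      simp only [pvIgnB, List.mem_cons, List.not_mem_nil, or_false, decide_eq_false_iff_not,
        not_or] at hm
      simp only [pvIgl, List.mem_cons, List.not_mem_nil, or_false, not_or]
      tauto
    simp [pvKeep, hmem, hm]

theorem bridge :
    ∀ (l cur : List Char),
      ((splitChar l cur).map (fun cs => String.ofList (cs.filter pvKeep))).filter (· ≠ "")
      = toks l (cur.reverse.filter pvKeep) := by
  intro l
  induction l with
  | nil =>
    intro cur
    rw [splitChar, List.map_cons, List.map_nil, toks]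
    by_cases hb : cur.reverse.filter pvKeep = []
    · rw [hb]
      simp
    · have hne : String.ofList (cur.reverse.filter pvKeep) ≠ "" := by
        simpa [ofList_eq_empty_iff] using hb
      rw [List.filter_cons_of_pos (by simpa using hne)]
      have : (cur.reverse.filter pvKeep).isEmpty = false := by simpa using hb
      rw [this]
      simp
  | cons c t ih =>
    intro cur
    by_cases hc : c = ' '
    · subst hc
      rw [show splitChar (' ' :: t) cur = cur.reverse :: splitChar t [] by simp [splitChar]]
      rw [List.map_cons, toks, if_pos rfl]
      by_cases hb : cur.reverse.filter pvKeep = []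
      · rw [hb]
        rw [List.filter_cons_of_neg (by simp)]
        rw [show ([] : List Char).isEmpty = true from rfl, if_pos rfl]
        have := ih []
        simpa using this
      · have hne : String.ofList (cur.reverse.filter pvKeep) ≠ "" := by
          simpa [ofList_eq_empty_iff] using hb
        rw [List.filter_cons_of_pos (by simpa using hne)]
        have hbe : (cur.reverse.filter pvKeep).isEmpty = false := by simpa using hb
        rw [hbe]
        have := ih []
        simp only [List.reverse_nil, List.filter_nil] at this
        rw [this]
        simp
    · rw [show splitChar (c :: t) cur = splitChar t (c :: cur) by simp [splitChar, hc]]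
      rw [ih (c :: cur)]
      rw [toks, if_neg hc]
      rw [List.reverse_cons, List.filter_append]
      by_cases hi : pvIgnB c = true
      · have hk : pvKeep c = false := by rw [keep_eq_not_ignB c hc, hi]; rfl
        rw [hi, if_pos rfl]
        simp [List.filter, hk]
      · rw [Bool.not_eq_true] at hi
        have hk : pvKeep c = true := by rw [keep_eq_not_ignB c hc, hi]; rfl
        rw [hi, if_neg Bool.false_ne_true]
        simp [List.filter, hk]

-- ===== VERDICT (by name: the statement is the Claim_ definition above) =====
set_option maxHeartbeats 2000000 in
theorem parse_spec : Claim_equal_parse := by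
  intro query _
  simp only [Spec_parse, parse, parse_alt]
  have hsep : (" " : String).toList = [' '] := by decide
  have hsplit : PySem.Str.split? (PySem.Str.lower query) " "
      = some (((splitChar (PySem.Chars.lower query.toList) []).map String.ofList)) := by
    rw [PySem.Str.split?, PySem.Chars.split?]
    rw [if_neg (by simp [hsep])]
    rw [PySem.Str.toList_lower, hsep, splitOn_char]
    rfl
  rw [hsplit]
  rw [show (some ((splitChar (PySem.Chars.lower query.toList) []).map String.ofList)).getD []
        = (splitChar (PySem.Chars.lower query.toList) []).map String.ofList from rfl]
  rw [foldA (fun w => ([" ", ".", ",", "$", "@", "\t", "\n", ";", ":", "!", "?"] : List String).foldl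
      (fun w ch => PySem.Str.replace w ch "") w)]
  rw [List.map_map]
  have hmap : ((fun w => ([" ", ".", ",", "$", "@", "\t", "\n", ";", ":", "!", "?"] : List String).foldl
      (fun w ch => PySem.Str.replace w ch "") w) ∘ String.ofList)
      = fun cs => String.ofList (cs.filter pvKeep) := by
    funext cs
    simp only [Function.comp_apply]
    exact strip_eq cs
  rw [hmap]
  have hA := bridge (PySem.Chars.lower query.toList) []
  simp only [List.reverse_nil, List.filter_nil] at hA
  rw [hA]
  rw [PySem.Str.toList_lower]
  rw [foldB (PySem.Chars.lower query.toList) [] []]
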